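-- pv_equiv track=rewrite | github.com/tulasidamarla/python | src/chapter11/ispalindrome.py | substringIsPalindrome
-- ===== SOURCE A (Python) =====
-- def substringIsPalindrome(text, start, end):
--     # Separate case for substrings of length 0 and 1.
--     if start >= end:
--         return True
--     else:
--         # Get first and last characters, converted to lowercase.
--         first = text[start].lower()
--         last = text[end].lower()
--         if first.isalpha() and last.isalpha():
--             if first == last:
--                 # Test substring that does’t contain the matching letters.
--                 return substringIsPalindrome(text, start + 1, end - 1)
--             else:
--                 return False
--         elif not last.isalpha():
--             # Test substring that does’t contain the last character.
--             return substringIsPalindrome(text, start, end - 1)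
--         else:
--             # Test substring that does’t contain the first character.
--             return substringIsPalindrome(text, start + 1, end)
-- ===== SOURCE B (Python) =====
-- def substringIsPalindrome(text, start, end):
--     if start >= end:
--         return True
--     letters = [text[i].lower() for i in range(start, end + 1)]
--     letters = [ch for ch in letters if ch.isalpha()]
--     return letters == letters[::-1]
-- ===== Notes on version B (the rewrite author's own statement) =====
-- stated objective: simpler
-- what changed: Replaces A's four-way recursive end-skipping with a non-recursive pipeline: collect the lowercased alphabetic characters of text[start..end] once and compare that list with its reverse.
import Mathlib
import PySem

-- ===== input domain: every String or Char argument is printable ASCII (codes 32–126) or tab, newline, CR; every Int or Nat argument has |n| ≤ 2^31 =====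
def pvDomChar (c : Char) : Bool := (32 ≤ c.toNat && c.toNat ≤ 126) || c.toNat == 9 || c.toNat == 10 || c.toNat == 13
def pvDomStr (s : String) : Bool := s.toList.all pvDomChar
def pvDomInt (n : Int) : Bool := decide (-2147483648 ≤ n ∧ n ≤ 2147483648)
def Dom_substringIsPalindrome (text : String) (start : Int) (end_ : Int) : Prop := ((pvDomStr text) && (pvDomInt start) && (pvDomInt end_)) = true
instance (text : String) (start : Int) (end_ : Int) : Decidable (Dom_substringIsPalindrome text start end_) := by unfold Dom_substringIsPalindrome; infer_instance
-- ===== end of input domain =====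

-- B replaces A's four-way recursion by one pass: collect the lowercased alphabetic
-- characters of text[start..end] and compare the list with its reverse (objective: simpler).


-- ===== PORT A =====
def substringIsPalindrome (text : String) (start : Int) (end_ : Int) : Bool :=
  if start ≥ end_ then true
  else
    match PySem.List.pyGet? text.toList start, PySem.List.pyGet? text.toList end_ with
    | some f0, some l0 =>
      let first := PySem.Chars.lowerChar f0
      let last := PySem.Chars.lowerChar l0
      if PySem.Chars.isalpha first && PySem.Chars.isalpha last then
        if first == last then substringIsPalindrome text (start + 1) (end_ - 1)
        else false
      else if !(PySem.Chars.isalpha last) then substringIsPalindrome text start (end_ - 1)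
      else substringIsPalindrome text (start + 1) end_
    | _, _ => false  -- IndexError in Python; excluded by Pre_
termination_by (end_ - start).toNat
decreasing_by all_goals omega

-- ===== PORT B =====
def substringIsPalindrome_alt (text : String) (start : Int) (end_ : Int) : Bool :=
  if start ≥ end_ then true
  else
    let letters := (PySem.List.pyRange start (end_ + 1) 1).map
      (fun i => PySem.Chars.lowerChar ((PySem.List.pyGet? text.toList i).getD ' '))
      -- .getD ' ': text[i] raises only outside Pre_
    let letters := letters.filter PySem.Chars.isalpha
    letters == letters.reverse

-- ===== PRECONDITION & SPEC =====
-- Pre_ excludes exactly the inputs where Python A raises IndexError: a nonempty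
-- index window (start < end) whose endpoints are not both valid indices of text.
def Pre_substringIsPalindrome (text : String) (start : Int) (end_ : Int) : Prop :=
  start < end_ → (-(text.toList.length : Int) ≤ start ∧ end_ < (text.toList.length : Int))
instance (text : String) (start : Int) (end_ : Int) : Decidable (Pre_substringIsPalindrome text start end_) := by unfold Pre_substringIsPalindrome; infer_instance

def pvWitness_substringIsPalindrome : String × Int × Int := ("aA.!a", 0, 4)

def Spec_substringIsPalindrome (text : String) (start : Int) (end_ : Int) (out : Bool) : Prop := out = substringIsPalindrome_alt text start end_
instance (text : String) (start : Int) (end_ : Int) (out : Bool) : Decidable (Spec_substringIsPalindrome text start end_ out) := by unfold Spec_substringIsPalindrome; infer_instance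

-- ===== CLAIM (what is proved, stated in full; the proofs are below) =====
def Claim_equal_substringIsPalindrome : Prop := ∀ (text : String) (start : Int) (end_ : Int), Dom_substringIsPalindrome text start end_ → Pre_substringIsPalindrome text start end_ → Spec_substringIsPalindrome text start end_ (substringIsPalindrome text start end_)

-- ===== LEMMAS AND PROOFS =====

-- the letter list B builds, as a named abbreviation for the proofs
def pvLetters (text : String) (start end_ : Int) : List Char :=
  ((PySem.List.pyRange start (end_ + 1) 1).map
    (fun i => PySem.Chars.lowerChar ((PySem.List.pyGet? text.toList i).getD ' '))).filter
    PySem.Chars.isalpha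

def pvF (text : String) (i : Int) : Char :=
  PySem.Chars.lowerChar ((PySem.List.pyGet? text.toList i).getD ' ')

lemma pvLetters_snoc (text : String) (s e : Int) (h : s ≤ e) :
    pvLetters text s e =
      pvLetters text s (e - 1) ++ (if PySem.Chars.isalpha (pvF text e) then [pvF text e] else []) := by
  unfold pvLetters pvF
  rw [show e + 1 = e + 1 from rfl, PySem.List.pyRange_one_succ_right (by omega : s ≤ e)]
  rw [show e - 1 + 1 = e from by ring]
  by_cases hx : PySem.Chars.isalpha (PySem.Chars.lowerChar ((PySem.List.pyGet? text.toList e).getD ' ')) = true <;>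
    simp [List.filter_append, hx]

lemma pvLetters_cons (text : String) (s e : Int) (h : s ≤ e) :
    pvLetters text s e =
      (if PySem.Chars.isalpha (pvF text s) then [pvF text s] else []) ++ pvLetters text (s + 1) e := by
  unfold pvLetters pvF
  rw [PySem.List.pyRange_one_cons (by omega : s < e + 1)]
  by_cases hx : PySem.Chars.isalpha (PySem.Chars.lowerChar ((PySem.List.pyGet? text.toList s).getD ' ')) = true <;>
    simp [hx]

lemma pvLetters_short (text : String) (s e : Int) (h : e ≤ s) :
    pvLetters text s e = [] ∨ ∃ c, pvLetters text s e = [c] := by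
  by_cases hse : s = e
  · subst hse
    unfold pvLetters
    rw [PySem.List.pyRange_one_cons (by omega : s < s + 1),
        PySem.List.pyRange_one_eq_nil (by omega : s + 1 ≤ s + 1)]
    simp only [List.map_cons, List.map_nil, List.filter_cons, List.filter_nil]
    split
    · exact Or.inr ⟨_, rfl⟩
    · exact Or.inl rfl
  · left
    unfold pvLetters
    rw [PySem.List.pyRange_one_eq_nil (by omega : e + 1 ≤ s)]
    simp

lemma pal_cons_snoc (a b : Char) (l : List Char) :
    ((a :: (l ++ [b])) == (a :: (l ++ [b])).reverse) = ((a == b) && (l == l.reverse)) := by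
  rcases eq_or_ne a b with rfl | hab
  · simp [List.reverse_cons]
  · have h1 : (a == b) = false := beq_eq_false_iff_ne.mpr hab
    simp [List.reverse_cons, h1]

-- B equals "letters is a palindrome" even when start ≥ end_ (letters then has ≤ 1 element)
lemma alt_eq_pal (text : String) (s e : Int) :
    substringIsPalindrome_alt text s e = (pvLetters text s e == (pvLetters text s e).reverse) := by
  unfold substringIsPalindrome_alt
  split
  · rcases pvLetters_short text s e (by omega) with h | ⟨c, h⟩ <;> simp [h]
  · rfl

-- main invariant: A computes the palindrome test of the letter list, given in-range endpoints
lemma a_eq_pal (text : String) : ∀ (n : Nat) (s e : Int), (e - s).toNat = n →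
    -(text.toList.length : Int) ≤ s → e < (text.toList.length : Int) →
    substringIsPalindrome text s e = (pvLetters text s e == (pvLetters text s e).reverse) := by
  intro n
  induction n using Nat.strong_induction_on with
  | _ n ih =>
    intro s e hn hs he
    rw [substringIsPalindrome]
    split
    · rcases pvLetters_short text s e (by omega) with h | ⟨c, h⟩ <;> simp [h]
    · rename_i hlt
      have hslt : s < e := by omega
      obtain ⟨cf, hcf⟩ : ∃ c, PySem.List.pyGet? text.toList s = some c := by
        cases hg : PySem.List.pyGet? text.toList s with
        | none =>
            exact absurd (⟨by omega, by omega⟩ : PySem.Raise.InRange text.toList.length s)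
              ((PySem.List.pyGet?_eq_none_iff text.toList s).mp hg)
        | some c => exact ⟨c, rfl⟩
      obtain ⟨cl, hcl⟩ : ∃ c, PySem.List.pyGet? text.toList e = some c := by
        cases hg : PySem.List.pyGet? text.toList e with
        | none =>
            exact absurd (⟨by omega, by omega⟩ : PySem.Raise.InRange text.toList.length e)
              ((PySem.List.pyGet?_eq_none_iff text.toList e).mp hg)
        | some c => exact ⟨c, rfl⟩
      rw [hcf, hcl]
      have hfs : pvF text s = PySem.Chars.lowerChar cf := by unfold pvF; rw [hcf]; rfl
      have hfe : pvF text e = PySem.Chars.lowerChar cl := by unfold pvF; rw [hcl]; rfl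
      simp only []
      by_cases hA : PySem.Chars.isalpha (PySem.Chars.lowerChar cf) = true ∧
                    PySem.Chars.isalpha (PySem.Chars.lowerChar cl) = true
      · -- both alpha
        rw [if_pos (by simp [hA.1, hA.2])]
        have hdecomp : pvLetters text s e =
            pvF text s :: (pvLetters text (s + 1) (e - 1) ++ [pvF text e]) := by
          rw [pvLetters_snoc text s e (by omega), pvLetters_cons text s (e - 1) (by omega)]
          rw [hfs, hfe]
          simp [hA.1, hA.2]
        rw [hdecomp, pal_cons_snoc, hfs, hfe]
        rw [ih ((e - 1) - (s + 1)).toNat (by omega) (s + 1) (e - 1) rfl (by omega) (by omega)]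
        cases hbe : (PySem.Chars.lowerChar cf == PySem.Chars.lowerChar cl) <;> simp_all
      · by_cases hL : PySem.Chars.isalpha (PySem.Chars.lowerChar cl) = true
        · -- last alpha, first not
          have hF : PySem.Chars.isalpha (PySem.Chars.lowerChar cf) = false := by
            rw [Bool.eq_false_iff]; intro h; exact hA ⟨h, hL⟩
          rw [if_neg (by simp [hF]), if_neg (by simp [hL])]
          rw [ih (e - (s + 1)).toNat (by omega) (s + 1) e rfl (by omega) (by omega)]
          rw [pvLetters_cons text s e (by omega), hfs]
          simp [hF]
        · -- last not alpha
          have hLf : PySem.Chars.isalpha (PySem.Chars.lowerChar cl) = false :=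
            Bool.eq_false_iff.mpr hL
          rw [if_neg (by simp [hLf]), if_pos (by simp [hLf])]
          rw [ih ((e - 1) - s).toNat (by omega) s (e - 1) rfl (by omega) (by omega)]
          rw [pvLetters_snoc text s e (by omega), hfe]
          simp [hLf]

-- ===== VERDICT (by name: the statement is the Claim_ definition above) =====
theorem substringIsPalindrome_spec : Claim_equal_substringIsPalindrome := by
  intro text start end_ _ hpre
  unfold Spec_substringIsPalindrome
  by_cases h : start ≥ end_
  · rw [substringIsPalindrome, substringIsPalindrome_alt, if_pos h, if_pos h]
  · obtain ⟨h1, h2⟩ := hpre (by omega)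
    rw [a_eq_pal text (end_ - start).toNat start end_ rfl h1 h2, alt_eq_pal]
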